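-- pv_equiv track=rewrite | github.com/roydeb/unseen_estimator | utils.py | generateHAlphas
-- ===== SOURCE A (Python) =====
-- def generateHAlphas(alphas, prop_dists):
--     hAlpha = []
--     for j in range(len(alphas)):
--         ha = []
--         for i in range(len(alphas[j])):
--             if alphas[j][i] in prop_dists[j]:
--                 ha.append(prop_dists[j].count(alphas[j][i]))
--             else:
--                 ha.append(0)
--         hAlpha.append(ha)
--     return hAlpha
-- ===== SOURCE B (Python) =====
-- def _bisect_left(a, x):
--     lo, hi = 0, len(a)
--     while lo < hi:
--         mid = (lo + hi) // 2
--         if a[mid] < x: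
--             lo = mid + 1
--         else:
--             hi = mid
--     return lo
--
--
-- def _bisect_right(a, x):
--     lo, hi = 0, len(a)
--     while lo < hi:
--         mid = (lo + hi) // 2
--         if x < a[mid]:
--             hi = mid
--         else:
--             lo = mid + 1
--     return lo
--
--
-- def generateHAlphas(alphas, prop_dists):
--     hAlpha = []
--     for j in range(len(alphas)):
--         srow = sorted(prop_dists[j])
--         hAlpha.append([_bisect_right(srow, x) - _bisect_left(srow, x)
--                        for x in alphas[j]])
--     return hAlpha
-- ===== Notes on version B (the rewrite author's own statement) =====
-- stated objective: faster
-- what changed: Instead of a per-element membership test plus a .count linear scan of prop_dists[j], B sorts each prop_dists row once and obtains each count as bisect_right - bisect_left (hand-written binary searches) on the sorted row; absent values naturally give 0.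
-- outside the precondition, e.g. on generateHAlphas([[]], []): A returns [[]], B raises IndexError
import Mathlib
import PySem

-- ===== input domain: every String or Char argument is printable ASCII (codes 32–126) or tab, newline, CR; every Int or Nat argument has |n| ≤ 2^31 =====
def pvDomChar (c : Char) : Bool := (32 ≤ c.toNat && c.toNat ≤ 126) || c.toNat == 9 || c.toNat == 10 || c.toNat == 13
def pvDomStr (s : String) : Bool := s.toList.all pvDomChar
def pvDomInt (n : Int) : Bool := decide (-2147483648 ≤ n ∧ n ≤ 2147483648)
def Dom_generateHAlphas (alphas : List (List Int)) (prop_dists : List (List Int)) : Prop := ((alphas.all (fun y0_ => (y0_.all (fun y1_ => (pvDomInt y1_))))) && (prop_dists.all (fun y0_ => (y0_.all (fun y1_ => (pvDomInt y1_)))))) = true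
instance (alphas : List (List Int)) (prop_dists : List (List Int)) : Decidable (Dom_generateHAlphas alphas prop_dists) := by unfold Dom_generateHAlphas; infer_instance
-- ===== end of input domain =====

-- B replaces A's per-element membership test + .count scan of each prop_dists row with
-- sort-the-row-once then bisect_right - bisect_left range counting; objective: faster (asymptotic).

-- ===== PORT A =====
def generateHAlphas (alphas : List (List Int)) (prop_dists : List (List Int)) : List (List Int) :=
  (PySem.List.pyRange 0 (alphas.length : Int)).foldl (fun hAlpha j =>
    let aj := PySem.List.pyGetD alphas j []
    let ha := (PySem.List.pyRange 0 (aj.length : Int)).foldl (fun ha i =>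
      let x := PySem.List.pyGetD aj i 0
      let pj := PySem.List.pyGetD prop_dists j []
      if x ∈ pj then ha ++ [(PySem.List.count pj x : Int)] else ha ++ [(0 : Int)]) []
    hAlpha ++ [ha]) []

-- ===== PORT B =====
-- Source B's hand-written _bisect_left/_bisect_right are exactly Python's bisect loop,
-- which PySem.List.bisectLeft / bisectRight transcribe (lo=0, hi=len, mid=(lo+hi)//2).
def generateHAlphas_alt (alphas : List (List Int)) (prop_dists : List (List Int)) : List (List Int) :=
  (PySem.List.pyRange 0 (alphas.length : Int)).foldl (fun hAlpha j =>
    let srow := PySem.List.sorted (PySem.List.pyGetD prop_dists j []) (fun y => y) false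
    hAlpha ++ [(PySem.List.pyGetD alphas j []).map (fun x =>
      ((PySem.List.bisectRight srow x : Int) - (PySem.List.bisectLeft srow x : Int)))]) []

-- ===== PRECONDITION & SPEC =====
-- Pre_ excludes inputs where alphas is longer than prop_dists: there A raises IndexError
-- unless every trailing row of alphas is empty, in which case A's trailing empty rows are an
-- accident of never touching prop_dists[j], while B (which indexes prop_dists[j] before
-- looking at alphas[j]) naturally raises IndexError there.
def Pre_generateHAlphas (alphas : List (List Int)) (prop_dists : List (List Int)) : Prop :=
  alphas.length ≤ prop_dists.length
instance (alphas : List (List Int)) (prop_dists : List (List Int)) : Decidable (Pre_generateHAlphas alphas prop_dists) := by unfold Pre_generateHAlphas; infer_instance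
def pvWitness_generateHAlphas : List (List Int) × List (List Int) := ([[1, 2, 3], [4]], [[1, 1, 2], [5]])
def Spec_generateHAlphas (alphas : List (List Int)) (prop_dists : List (List Int)) (out : List (List Int)) : Prop := out = generateHAlphas_alt alphas prop_dists
instance (alphas : List (List Int)) (prop_dists : List (List Int)) (out : List (List Int)) : Decidable (Spec_generateHAlphas alphas prop_dists out) := by unfold Spec_generateHAlphas; infer_instance

-- ===== CLAIM (what is proved, stated in full; the proofs are below) =====
def Claim_equal_generateHAlphas : Prop := ∀ (alphas : List (List Int)) (prop_dists : List (List Int)), Dom_generateHAlphas alphas prop_dists → Pre_generateHAlphas alphas prop_dists → Spec_generateHAlphas alphas prop_dists (generateHAlphas alphas prop_dists)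

-- ===== LEMMAS AND PROOFS =====

-- One row of A: the membership-guarded count equals the plain count (count = 0 when absent).
lemma row_a_eq_count (aj pj : List Int) :
    (PySem.List.pyRange 0 (aj.length : Int)).foldl (fun ha i =>
      let x := PySem.List.pyGetD aj i 0
      if x ∈ pj then ha ++ [(PySem.List.count pj x : Int)] else ha ++ [(0 : Int)]) []
    = aj.map (fun x => (List.count x pj : Int)) := by
  rw [PySem.List.foldl_pyRange_zero_pyGetD' aj 0
    (fun ha x => if x ∈ pj then ha ++ [(PySem.List.count pj x : Int)] else ha ++ [(0 : Int)]) []]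
  induction aj using List.reverseRecOn with
  | nil => simp
  | append_singleton xs x ih =>
      rw [List.foldl_append, List.map_append, ih]
      by_cases hx : x ∈ pj
      · simp [hx, PySem.List.count]
      · simp [hx, List.count_eq_zero.mpr hx]

-- On a ≤-sorted list, a downward-closed predicate holds exactly on the first countP positions.
lemma countP_threshold (p : Int → Bool) (hmono : ∀ y z : Int, z ≤ y → p y = true → p z = true)
    (l : List Int) (hs : l.Pairwise (fun a b : Int => a ≤ b)) :
    ∀ i (hi : i < l.length), (p l[i] = true ↔ i < l.countP p) := by
  induction l with
  | nil => intro i hi; simp at hi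
  | cons a t ih =>
    rcases List.pairwise_cons.mp hs with ⟨ha, ht⟩
    have hzero : p a = false → t.countP p = 0 := by
      intro hpa
      apply List.countP_eq_zero.mpr
      intro y hy hpy
      have : p a = true := hmono y a (ha y hy) hpy
      simp [hpa] at this
    intro i hi
    cases i with
    | zero =>
      simp only [List.getElem_cons_zero, List.countP_cons]
      constructor
      · intro hp; simp [hp]
      · intro hlt
        by_contra hpa
        have hpa' : p a = false := Bool.eq_false_iff.mpr hpa
        simp [hzero hpa', hpa'] at hlt
    | succ i =>
      have hi' : i < t.length := by simpa using hi
      simp only [List.getElem_cons_succ, List.countP_cons]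
      by_cases hpa : p a = true
      · rw [ih ht i hi']
        simp [hpa]
      · have hpa' : p a = false := Bool.eq_false_iff.mpr hpa
        have h0 := hzero hpa'
        constructor
        · intro hpt
          have : p a = true := hmono t[i] a (ha t[i] (List.getElem_mem hi')) hpt
          simp [hpa'] at this
        · intro hlt; simp [h0, hpa'] at hlt

-- Any N with the threshold property of a downward-closed predicate equals countP.
lemma eq_countP_of_threshold (p : Int → Bool)
    (hmono : ∀ y z : Int, z ≤ y → p y = true → p z = true)
    (s : List Int) (hs : s.Pairwise (fun a b : Int => a ≤ b)) (N : Nat) (hN : N ≤ s.length)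
    (h1 : ∀ j (hj : j < s.length), j < N → p s[j] = true)
    (h2 : ∀ j (hj : j < s.length), N ≤ j → p s[j] = false) :
    N = s.countP p := by
  have thr := countP_threshold p hmono s hs
  have hC : s.countP p ≤ s.length := List.countP_le_length
  rcases lt_trichotomy N (s.countP p) with h | h | h
  · have hNlen : N < s.length := lt_of_lt_of_le h hC
    have := (thr N hNlen).mpr h
    rw [h2 N hNlen (le_refl N)] at this
    exact absurd this (by simp)
  · exact h
  · have hClen : s.countP p < s.length := lt_of_lt_of_le h hN
    have hp := h1 _ hClen h
    have := (thr _ hClen).mp hp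
    omega

lemma countP_le_split (l : List Int) (x : Int) :
    l.countP (fun y => decide (y ≤ x)) = l.countP (fun y => decide (y < x)) + l.count x := by
  induction l with
  | nil => simp
  | cons a t ih =>
    simp only [List.countP_cons, List.count_cons, ih]
    rcases lt_trichotomy a x with h | h | h
    · simp [h, h.le, h.ne]
      omega
    · subst h; simp
      omega
    · simp [not_lt.mpr h.le, not_le.mpr h, h.ne']

-- One column of B: bisect_right − bisect_left on the sorted row is the count in the row.
lemma bisect_diff_eq_count (pj : List Int) (x : Int) :
    ((PySem.List.bisectRight (PySem.List.sorted pj (fun y => y) false) x : Int)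
      - (PySem.List.bisectLeft (PySem.List.sorted pj (fun y => y) false) x : Int))
    = (List.count x pj : Int) := by
  set s := PySem.List.sorted pj (fun y => y) false with hsdef
  have hs : s.Pairwise (fun a b : Int => a ≤ b) := PySem.List.sorted_pairwise pj (fun y => y)
  obtain ⟨hL0, hL1, hL2⟩ := PySem.List.bisectLeft_spec s x hs
  obtain ⟨hR0, hR1, hR2⟩ := PySem.List.bisectRight_spec s x hs
  have hL : PySem.List.bisectLeft s x = s.countP (fun y => decide (y < x)) := by
    refine eq_countP_of_threshold _ (fun y z hzy hy => ?_) s hs _ hL0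
      (fun j hj hlt => by simpa using hL1 j hj hlt)
      (fun j hj hle => by simpa using not_lt.mpr (hL2 j hj hle))
    simp only [decide_eq_true_eq] at *
    omega
  have hR : PySem.List.bisectRight s x = s.countP (fun y => decide (y ≤ x)) := by
    refine eq_countP_of_threshold _ (fun y z hzy hy => ?_) s hs _ hR0
      (fun j hj hlt => by simpa using hR1 j hj hlt)
      (fun j hj hle => by simpa using not_le.mpr (hR2 j hj hle))
    simp only [decide_eq_true_eq] at *
    omega
  have hcnt : s.count x = pj.count x := (PySem.List.sorted_perm pj (fun y => y) false).count_eq x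
  rw [hL, hR, countP_le_split, ← hcnt]
  push_cast
  ring

theorem generateHAlphas_spec : Claim_equal_generateHAlphas := by
  intro alphas prop_dists _ hpre
  unfold Pre_generateHAlphas at hpre
  unfold Spec_generateHAlphas generateHAlphas generateHAlphas_alt
  simp only [PySem.List.foldl_append_singleton_eq_map, List.nil_append, row_a_eq_count]
  refine List.map_congr_left (fun j hj => ?_)
  have hj' : 0 ≤ j ∧ j < (alphas.length : Int) := by
    have := PySem.List.mem_pyRange_one.mp hj
    exact ⟨this.1, this.2⟩
  have hA := PySem.List.pyGetD_eq_getElem alphas (i := j) [] hj'.1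
    (by exact_mod_cast hj'.2)
  have hjp : j < (prop_dists.length : Int) := by
    have : (alphas.length : Int) ≤ (prop_dists.length : Int) := by exact_mod_cast hpre
    omega
  have hP := PySem.List.pyGetD_eq_getElem prop_dists (i := j) [] hj'.1
    (by exact_mod_cast hjp)
  rw [hA, hP]
  refine List.map_congr_left (fun x _ => ?_)
  exact (bisect_diff_eq_count _ x).symm

-- ===== VERDICT (by name: the statement is the Claim_ definition above) =====
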